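-- pv_equiv track=rewrite | github.com/tictactoeid/Algorithm-Problems | LeetCode/241103 - 1416.py | helper
-- ===== SOURCE A (Python) =====
-- def helper(s, i, k):
--     # s[i:] 에서, 앞에서부터 얼마까지 잘라야 k보다 작은지를 체크
--     string = s[i:]
--     low = 0
--     high = min(len(string), len(str(k)))  # TLE 방지
--
--     answer = low
--
--     while low <= high:
--         mid = (low + high) // 2
--         if not string[:mid] or int(string[:mid]) <= k:
--             answer = max(answer, mid)
--             low = mid + 1
--         else:
--             high = mid - 1
--
--     return answer + i
-- ===== SOURCE B (Python) =====
-- def helper(s, i, k):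
--     # Forward scan over all capped prefix lengths instead of binary search:
--     # keep the largest length whose int value is <= k, skipping unparseable prefixes.
--     string = s[i:]
--     high = min(len(string), len(str(k)))
--     answer = 0
--     for m in range(1, high + 1):
--         try:
--             if int(string[:m]) <= k:
--                 answer = m
--         except ValueError:
--             pass
--     return answer + i
-- ===== Notes on version B (the rewrite author's own statement) =====
-- stated objective: simpler
-- what changed: Replaced the binary search over prefix lengths (probe mid=(low+high)//2, track best, shrink [low,high]) by a single forward for-loop over all prefix lengths 1..high that records the largest length whose int value is <= k, skipping unparseable prefixes with try/except instead of raising.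
-- outside the precondition, e.g. on helper('12_34', 0, 10000): A returns 5, B returns 5; on helper('+123', 0, 1000): A returns 4, B returns 4
import Mathlib
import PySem

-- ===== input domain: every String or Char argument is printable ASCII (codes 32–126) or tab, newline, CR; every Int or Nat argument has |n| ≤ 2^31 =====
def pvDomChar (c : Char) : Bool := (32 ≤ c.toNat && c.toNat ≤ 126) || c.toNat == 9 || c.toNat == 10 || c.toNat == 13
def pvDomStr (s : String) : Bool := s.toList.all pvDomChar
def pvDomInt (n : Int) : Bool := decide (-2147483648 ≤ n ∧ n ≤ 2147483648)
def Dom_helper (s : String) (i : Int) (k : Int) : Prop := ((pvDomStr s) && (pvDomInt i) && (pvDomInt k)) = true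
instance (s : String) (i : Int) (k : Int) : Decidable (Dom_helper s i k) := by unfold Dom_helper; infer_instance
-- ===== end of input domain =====

-- B replaces A's binary search over prefix lengths by a plain forward scan that skips
-- unparseable prefixes; objective: simpler. Equality is claimed on Pre_helper.

-- ===== PORT A =====
-- while low <= high: mid = (low+high)//2; cond → answer, low = mid+1; else high = mid-1
def helperLoopA (string : List Char) (k : Int) (low high answer : Int) : Int :=
  if _h : low ≤ high then
    let mid := PySem.Int.floordiv (low + high) 2
    let pref := PySem.List.slice string none (some mid)          -- string[:mid]
    if pref = [] then                                            -- "not string[:mid]" (short-circuit or)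
      helperLoopA string k (mid + 1) high (max answer mid)
    else if (PySem.Int.ofChars? pref).getD 0 ≤ k then            -- int(string[:mid]) <= k; ValueError (none) excluded by Pre_
      helperLoopA string k (mid + 1) high (max answer mid)
    else
      helperLoopA string k low (mid - 1) answer
  else answer
termination_by (high + 1 - low).toNat
decreasing_by
  · have := PySem.Int.floordiv_two_mid_bounds (lo := low) (hi := high) _h
    omega
  · have := PySem.Int.floordiv_two_mid_bounds (lo := low) (hi := high) _h
    omega
  · have := PySem.Int.floordiv_two_mid_bounds (lo := low) (hi := high) _h
    omega

def helper (s : String) (i : Int) (k : Int) : Int :=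
  let string := PySem.List.slice s.toList (some i) none                          -- s[i:]
  let high := min (string.length : Int) ((PySem.Int.toChars k).length : Int)     -- min(len(string), len(str(k)))
  helperLoopA string k 0 high 0 + i                                              -- low = 0, answer = low

-- ===== PORT B =====
def helper_alt (s : String) (i : Int) (k : Int) : Int :=
  let string := PySem.List.slice s.toList (some i) none                          -- s[i:]
  let high := min (string.length : Int) ((PySem.Int.toChars k).length : Int)     -- min(len(string), len(str(k)))
  let answer := (PySem.List.pyRange 1 (high + 1) 1).foldl                        -- for m in range(1, high+1)
    (fun ans m =>
      match PySem.Int.ofChars? (PySem.List.slice string none (some m)) with      -- try: int(string[:m])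
      | none => ans                                                              -- except ValueError: pass
      | some v => if v ≤ k then m else ans) 0                                    -- if … <= k: answer = m
  answer + i

-- ===== PRECONDITION & SPEC =====
-- Pre_helper: every prefix of the first min(len(s[i:]), len(str(k))) characters of s[i:] parses as a
-- Python int, and the parsed prefix values are nondecreasing in length.  Outside Pre_, A's binary
-- search raises ValueError on almost every input as soon as it probes an unparseable prefix; on the
-- few excluded inputs where its probe order happens to skip the bad prefix and A returns, B returns
-- the same value (see the cites) — they are excluded only because int()'s parser is opaque to the
-- proof.  The monotonicity clause is factually redundant for parseable ASCII windows (successive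
-- parseable prefixes of one window never decrease) and excludes no further real inputs.
def Pre_helper (s : String) (i : Int) (k : Int) : Prop :=
  (∀ m : Nat, m < min (PySem.List.slice s.toList (some i) none).length (PySem.Int.toChars k).length →
      (PySem.Int.ofChars? ((PySem.List.slice s.toList (some i) none).take (m + 1))).isSome = true) ∧
  (∀ m : Nat, m < min (PySem.List.slice s.toList (some i) none).length (PySem.Int.toChars k).length →
    ∀ m' : Nat, m' < min (PySem.List.slice s.toList (some i) none).length (PySem.Int.toChars k).length →
      m ≤ m' →
      (PySem.Int.ofChars? ((PySem.List.slice s.toList (some i) none).take (m + 1))).getD 0 ≤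
        (PySem.Int.ofChars? ((PySem.List.slice s.toList (some i) none).take (m' + 1))).getD 0)

instance (s : String) (i : Int) (k : Int) : Decidable (Pre_helper s i k) := by
  unfold Pre_helper; infer_instance

def pvWitness_helper : String × Int × Int := ("123", 0, 45)

def Spec_helper (s : String) (i : Int) (k : Int) (out : Int) : Prop := out = helper_alt s i k
instance (s : String) (i : Int) (k : Int) (out : Int) : Decidable (Spec_helper s i k out) := by unfold Spec_helper; infer_instance

-- ===== CLAIM (what is proved, stated in full; the proofs are below) =====
def Claim_equal_helper : Prop := ∀ (s : String) (i : Int) (k : Int), Dom_helper s i k → Pre_helper s i k → Spec_helper s i k (helper s i k)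

-- ===== LEMMAS AND PROOFS =====

-- parsed value of the m-character prefix of the window (0 where int() would raise; Pre_ rules that out)
def pvVal (string : List Char) (m : Nat) : Int := (PySem.Int.ofChars? (string.take m)).getD 0

-- the test both loops perform at prefix length m (at m = 0 A short-circuits on the empty prefix)
def pvCnd (string : List Char) (k : Int) (m : Nat) : Bool := m == 0 || decide (pvVal string m ≤ k)

-- the common answer: the largest prefix length ≤ H passing the test
def pvT (string : List Char) (k : Int) (H : Nat) : Nat :=
  Nat.findGreatest (fun m => pvCnd string k m = true) H

theorem pvCnd_zero (string : List Char) (k : Int) : pvCnd string k 0 = true := by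
  simp [pvCnd]

theorem pvT_le (string : List Char) (k : Int) (H : Nat) : pvT string k H ≤ H :=
  Nat.findGreatest_le H

-- threshold characterisation of the test, from the second Pre_ clause
theorem pv_thr (string : List Char) (k : Int) (H : Nat)
    (hmono : ∀ m : Nat, m < H → ∀ m' : Nat, m' < H → m ≤ m' →
      pvVal string (m + 1) ≤ pvVal string (m' + 1)) :
    ∀ m : Nat, m ≤ H → (pvCnd string k m = true ↔ m ≤ pvT string k H) := by
  have hanti : ∀ m m' : Nat, m ≤ m' → m' ≤ H → pvCnd string k m' = true → pvCnd string k m = true := by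
    intro m m' hmm hm'H hc
    rcases Nat.eq_zero_or_pos m with rfl | hm
    · exact pvCnd_zero string k
    · rcases Nat.eq_zero_or_pos m' with rfl | hm'
      · omega
      · simp only [pvCnd, Bool.or_eq_true, beq_iff_eq, decide_eq_true_eq] at hc ⊢
        right
        have hv : pvVal string m ≤ pvVal string m' := by
          have := hmono (m - 1) (by omega) (m' - 1) (by omega) (by omega)
          simpa [Nat.sub_add_cancel hm, Nat.sub_add_cancel hm'] using this
        rcases hc with hc | hc
        · omega
        · exact le_trans hv hc
  intro m hmH
  constructor
  · intro hc
    by_contra hgt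
    have : pvT string k H < m := by omega
    exact absurd hc (Nat.findGreatest_is_greatest this hmH)
  · intro hle
    have hT : pvCnd string k (pvT string k H) = true :=
      Nat.findGreatest_spec (P := fun m => pvCnd string k m = true) (Nat.zero_le H)
        (pvCnd_zero string k)
    exact hanti m (pvT string k H) hle (pvT_le string k H) hT

-- the branch test of A's loop, rewritten to pvCnd (0 ≤ mid ≤ length of the window)
theorem pvCnd_of_branch (string : List Char) (k : Int) (mid : Int)
    (h0 : 0 ≤ mid) (hlen : mid ≤ (string.length : Int)) :
    ((PySem.List.slice string none (some mid) = []) ∨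
      ((PySem.List.slice string none (some mid) ≠ []) ∧
        (PySem.Int.ofChars? (PySem.List.slice string none (some mid))).getD 0 ≤ k))
    ↔ pvCnd string k mid.toNat = true := by
  rw [PySem.List.slice_to string h0]
  simp only [pvCnd, pvVal, Bool.or_eq_true, beq_iff_eq, decide_eq_true_eq]
  have hnil : string.take mid.toNat = [] ↔ mid.toNat = 0 := by
    rw [List.take_eq_nil_iff]
    constructor
    · rintro (h | rfl)
      · exact h
      · simp at hlen; omega
    · intro h; exact Or.inl h
  constructor
  · rintro (h | ⟨_, h⟩)
    · exact Or.inl (hnil.mp h)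
    · exact Or.inr h
  · rintro (h | h)
    · exact Or.inl (hnil.mpr h)
    · by_cases hz : string.take mid.toNat = []
      · exact Or.inl hz
      · exact Or.inr ⟨hz, h⟩

-- A's binary search returns the threshold pvT
theorem loopA_eq (string : List Char) (k : Int) (H : Nat) (hH : H ≤ string.length)
    (thr : ∀ m : Nat, m ≤ H → (pvCnd string k m = true ↔ m ≤ pvT string k H)) :
    ∀ n : Nat, ∀ low high answer : Int, (high + 1 - low).toNat ≤ n →
      0 ≤ low → low ≤ (pvT string k H : Int) + 1 → (pvT string k H : Int) ≤ high →
      high ≤ (H : Int) → answer = max 0 (low - 1) →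
      helperLoopA string k low high answer = (pvT string k H : Int) := by
  set T := pvT string k H with hT
  intro n
  induction n with
  | zero =>
    intro low high answer hn h0 hlT hTh hhH hans
    rw [helperLoopA, dif_neg (by omega : ¬ low ≤ high)]
    omega
  | succ n ih =>
    intro low high answer hn h0 hlT hTh hhH hans
    by_cases hlh : low ≤ high
    · rw [helperLoopA, dif_pos hlh]
      have hmid := PySem.Int.floordiv_two_mid_bounds (lo := low) (hi := high) hlh
      have hmid0 : 0 ≤ PySem.Int.floordiv (low + high) 2 := by omega
      have hmidlen : PySem.Int.floordiv (low + high) 2 ≤ (string.length : Int) := by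
        have : (H : Int) ≤ (string.length : Int) := by exact_mod_cast hH
        omega
      set mid := PySem.Int.floordiv (low + high) 2 with hmiddef
      dsimp only
      have hmidH : mid.toNat ≤ H := by omega
      have hbr := pvCnd_of_branch string k mid hmid0 hmidlen
      by_cases hc : pvCnd string k mid.toNat = true
      · have hmidT : (mid : Int) ≤ (T : Int) := by
          have := (thr mid.toNat hmidH).mp hc
          omega
        have hrec : helperLoopA string k (mid + 1) high (max answer mid) = (T : Int) := by
          apply ih <;> omega
        by_cases hnil : PySem.List.slice string none (some mid) = []
        · rw [if_pos hnil]; exact hrec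
        · rcases hbr.mpr hc with h | ⟨_, hval⟩
          · exact absurd h hnil
          · rw [if_neg hnil, if_pos hval]; exact hrec
      · have hdis : ¬ ((PySem.List.slice string none (some mid) = []) ∨
            ((PySem.List.slice string none (some mid) ≠ []) ∧
              (PySem.Int.ofChars? (PySem.List.slice string none (some mid))).getD 0 ≤ k)) := by
          intro h; exact hc (hbr.mp h)
        push Not at hdis
        obtain ⟨hnil, hval⟩ := hdis
        have hmidT : (T : Int) ≤ mid - 1 := by
          have : ¬ (mid.toNat ≤ T) := fun h => hc ((thr mid.toNat hmidH).mpr h)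
          omega
        rw [if_neg hnil, if_neg (not_le.mpr (hval hnil))]
        apply ih <;> omega
    · rw [helperLoopA, dif_neg hlh]
      omega

-- B's forward scan returns the threshold pvT (hsome: Pre_'s parseability clause)
theorem foldB_eq (string : List Char) (k : Int) (H : Nat)
    (hsome : ∀ m : Nat, m < H → (PySem.Int.ofChars? (string.take (m + 1))).isSome = true)
    (thr : ∀ m : Nat, m ≤ H → (pvCnd string k m = true ↔ m ≤ pvT string k H)) :
    ∀ J : Nat, J ≤ H →
      (PySem.List.pyRange 1 ((J : Int) + 1) 1).foldl
        (fun ans m =>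
          match PySem.Int.ofChars? (PySem.List.slice string none (some m)) with
          | none => ans
          | some v => if v ≤ k then m else ans) 0 = ((min J (pvT string k H) : Nat) : Int) := by
  set T := pvT string k H with hTdef
  intro J
  induction J with
  | zero =>
    intro _
    simp
  | succ J ih =>
    intro hJH
    have hcast : ((J + 1 : Nat) : Int) + 1 = ((J : Int) + 1) + 1 := by push_cast; ring
    rw [hcast, PySem.List.pyRange_one_succ_right (by omega), List.foldl_append]
    rw [ih (by omega)]
    have hslice : PySem.List.slice string none (some ((J : Int) + 1)) = string.take (J + 1) := by
      have : ((J : Int) + 1) = ((J + 1 : Nat) : Int) := by push_cast; ring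
      rw [this, PySem.List.slice_to_natCast]
    have hcnd : pvCnd string k (J + 1) = true ↔ (J + 1 ≤ T) := thr (J + 1) hJH
    obtain ⟨v, hv⟩ := Option.isSome_iff_exists.mp (hsome J (by omega))
    simp only [List.foldl_cons, List.foldl_nil, hslice, hv]
    have hval : pvVal string (J + 1) = v := by simp [pvVal, hv]
    by_cases hvk : v ≤ k
    · rw [if_pos hvk]
      have h1 : J + 1 ≤ T := by
        apply hcnd.mp
        simp [pvCnd, hval, hvk]
      have : min (J + 1) T = J + 1 := by omega
      rw [this]
      push_cast; ring
    · rw [if_neg hvk]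
      have h1 : ¬ (J + 1 ≤ T) := by
        intro h
        have := hcnd.mpr h
        simp [pvCnd, hval] at this
        exact hvk this
      have : min (J + 1) T = min J T := by omega
      rw [this]

-- ===== VERDICT (by name: the statement is the Claim_ definition above) =====
theorem helper_spec : Claim_equal_helper := by
  intro s i k _hdom hpre
  unfold Spec_helper helper helper_alt
  obtain ⟨hsome, hmono⟩ := hpre
  set string := PySem.List.slice s.toList (some i) none with hstring
  set H : Nat := min string.length (PySem.Int.toChars k).length with hHdef
  have hHlen : H ≤ string.length := by omega
  have hhigh : min (string.length : Int) ((PySem.Int.toChars k).length : Int) = (H : Int) := by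
    rw [hHdef]; push_cast; ring_nf
  have thr := pv_thr string k H (by
    intro m hm m' hm' hmm'
    exact hmono m hm m' hm' hmm')
  set T := pvT string k H with hTdef
  have hA : helperLoopA string k 0 (min (string.length : Int) ((PySem.Int.toChars k).length : Int)) 0 = (T : Int) := by
    rw [hhigh]
    exact loopA_eq string k H hHlen thr (H + 1) 0 (H : Int) 0 (by omega) (by omega)
      (by have := pvT_le string k H; omega) (by have := pvT_le string k H; omega)
      (by omega) (by omega)
  have hB : (PySem.List.pyRange 1 (min (string.length : Int) ((PySem.Int.toChars k).length : Int) + 1) 1).foldl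
      (fun ans m =>
        match PySem.Int.ofChars? (PySem.List.slice string none (some m)) with
        | none => ans
        | some v => if v ≤ k then m else ans) 0 = (T : Int) := by
    rw [hhigh]
    have h := foldB_eq string k H hsome thr H (le_refl H)
    have hmin : min H (pvT string k H) = T := by
      have := pvT_le string k H; omega
    rw [hmin] at h
    exact h
  dsimp only
  rw [hA, hB]
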